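-- pv_equiv track=rewrite | github.com/monarch-initiative/monarch-app | backend/src/monarch_py/implementations/spacy/text_annotation_utils.py | replace_entities
-- ===== SOURCE A (Python) =====
-- def replace_entities(text, entities):
--     replaced_text = text
--     # Sort the entities in descending order of start character indices
--     entities = sorted(entities, key=lambda x: x[0], reverse=True)
--     for entity in entities:
--         # start, end = entity[0] - 1, entity[1] #for OAK
--         start, end = entity[0], entity[1]
--         # entity_value = entity[2]
--         entity_value = f'<span class="sciCrunchAnnotation" data-sciGraph="{entity[2]}">{text[start:end]}</span>'
--         replaced_text = replaced_text[:start] + entity_value + replaced_text[end:]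
--     return replaced_text
-- ===== SOURCE B (Python) =====
-- def replace_entities(text, entities):
--     # Selection instead of sorting: repeatedly take the entity with the largest
--     # start (first one on ties, like the stable reverse sort) and splice it in.
--     remaining = list(entities)
--     replaced = text
--     while remaining:
--         entity = max(remaining, key=lambda x: x[0])
--         remaining.remove(entity)
--         start, end = entity[0], entity[1]
--         entity_value = f'<span class="sciCrunchAnnotation" data-sciGraph="{entity[2]}">{text[start:end]}</span>'
--         replaced = replaced[:start] + entity_value + replaced[end:]
--     return replaced
-- ===== Notes on version B (the rewrite author's own statement) =====
-- stated objective: alternative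
-- what changed: Instead of sorting the entities by descending start and iterating, B repeatedly selects the entity with the largest start (first one on ties, matching the stable reverse sort) from a shrinking worklist and splices it immediately; no sorting pass.
import Mathlib
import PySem

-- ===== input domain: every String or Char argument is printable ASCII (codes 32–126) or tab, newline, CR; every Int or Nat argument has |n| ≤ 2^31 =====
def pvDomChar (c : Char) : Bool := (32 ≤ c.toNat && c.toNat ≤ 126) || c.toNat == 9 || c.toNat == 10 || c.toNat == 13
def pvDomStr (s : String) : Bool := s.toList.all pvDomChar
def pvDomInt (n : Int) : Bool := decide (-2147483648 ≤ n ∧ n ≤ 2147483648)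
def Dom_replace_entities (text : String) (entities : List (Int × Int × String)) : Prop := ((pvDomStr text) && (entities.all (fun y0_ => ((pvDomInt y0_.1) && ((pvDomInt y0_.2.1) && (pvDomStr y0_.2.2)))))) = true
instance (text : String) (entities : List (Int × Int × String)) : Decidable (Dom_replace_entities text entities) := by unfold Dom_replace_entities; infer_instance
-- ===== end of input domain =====

-- B replaces A's sort-then-iterate by repeated selection from a worklist: take the entity with
-- the largest start (the first one on ties, matching the stable reverse sort) and splice it at
-- once; same result on every input, no sorting pass (objective: alternative).

-- the f-string both Pythons build for one entity
def pvSpan (text : String) (ent : Int × Int × String) : String :=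
  "<span class=\"sciCrunchAnnotation\" data-sciGraph=\"" ++ ent.2.2 ++ "\">" ++
    PySem.Str.slice text (some ent.1) (some ent.2.1) ++ "</span>"

-- ===== PORT A =====
def replace_entities (text : String) (entities : List (Int × Int × String)) : String :=
  let sortedEnts := PySem.List.sorted entities (fun x => x.1) true
  sortedEnts.foldl
    (fun replaced ent =>
      PySem.Str.slice replaced none (some ent.1) ++ pvSpan text ent ++
        PySem.Str.slice replaced (some ent.2.1) none)
    text

-- ===== PORT B =====
-- the while loop of Source B: pick the first entity with maximal start, remove it, splice
def pvLoopB (text : String) (remaining : List (Int × Int × String)) (replaced : String) : String :=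
  match PySem.List.max? remaining (fun x => x.1) with
  | none => replaced
  | some entity =>
    match h2 : PySem.List.remove? remaining entity with
    | none => replaced  -- unreachable (the maximum is a member); default keeps the port total
    | some rest =>
      pvLoopB text rest
        (PySem.Str.slice replaced none (some entity.1) ++ pvSpan text entity ++
          PySem.Str.slice replaced (some entity.2.1) none)
  termination_by remaining.length
  decreasing_by
    have hmem : entity ∈ remaining := by
      by_contra hn
      rw [(PySem.List.remove?_eq_none_iff remaining entity).mpr hn] at h2
      cases h2
    rw [PySem.List.remove?_eq_some_erase remaining entity hmem] at h2
    cases h2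
    have h3 := List.length_erase_of_mem hmem
    have h4 := List.length_pos_of_mem hmem
    omega

def replace_entities_alt (text : String) (entities : List (Int × Int × String)) : String :=
  pvLoopB text entities text

-- ===== PRECONDITION & SPEC =====
def Spec_replace_entities (text : String) (entities : List (Int × Int × String)) (out : String) : Prop := out = replace_entities_alt text entities
instance (text : String) (entities : List (Int × Int × String)) (out : String) : Decidable (Spec_replace_entities text entities out) := by unfold Spec_replace_entities; infer_instance

-- ===== CLAIM (what is proved, stated in full; the proofs are below) =====
def Claim_equal_replace_entities : Prop := ∀ (text : String) (entities : List (Int × Int × String)), Dom_replace_entities text entities → Spec_replace_entities text entities (replace_entities text entities)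

-- ===== LEMMAS AND PROOFS =====

theorem pv_max_step (a y : Int × Int × String) (ys : List (Int × Int × String)) :
    PySem.List.max? (a :: y :: ys) (fun x => x.1)
      = PySem.List.max? ((if a.1 < y.1 then y else a) :: ys) (fun x => x.1) := by
  by_cases h : a.1 < y.1 <;> simp [PySem.List.max?, h]

-- the running max of a :: t is the first maximal element
theorem pv_max_aux (t : List (Int × Int × String)) :
    ∀ (a m : Int × Int × String),
    PySem.List.max? (a :: t) (fun x => x.1) = some m →
    (m = a ∧ ∀ y ∈ t, y.1 ≤ a.1) ∨
      (∃ pre post, t = pre ++ m :: post ∧ a.1 < m.1 ∧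
        (∀ y ∈ pre, y.1 < m.1) ∧ (∀ y ∈ post, y.1 ≤ m.1)) := by
  induction t with
  | nil =>
    intro a m h
    simp only [PySem.List.max?, List.foldl_cons, List.foldl_nil, Option.some.injEq] at h
    exact Or.inl ⟨h.symm, by simp⟩
  | cons y ys ih =>
    intro a m h
    rw [pv_max_step] at h
    by_cases hy : a.1 < y.1
    · rw [if_pos hy] at h
      rcases ih y m h with ⟨rfl, hall⟩ | ⟨pre, post, rfl, hlt, hpre, hpost⟩
      · exact Or.inr ⟨[], ys, rfl, hy, by simp, hall⟩
      · refine Or.inr ⟨y :: pre, post, rfl, lt_trans hy hlt, ?_, hpost⟩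
        intro z hz
        rcases List.mem_cons.mp hz with rfl | hz
        · exact hlt
        · exact hpre z hz
    · rw [if_neg hy] at h
      rcases ih a m h with ⟨rfl, hall⟩ | ⟨pre, post, rfl, hlt, hpre, hpost⟩
      · refine Or.inl ⟨rfl, ?_⟩
        intro z hz
        rcases List.mem_cons.mp hz with rfl | hz
        · omega
        · exact hall z hz
      · refine Or.inr ⟨y :: pre, post, rfl, hlt, ?_, hpost⟩
        intro z hz
        rcases List.mem_cons.mp hz with rfl | hz
        · omega
        · exact hpre z hz

theorem pv_max_split (xs : List (Int × Int × String)) (m : Int × Int × String)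
    (h : PySem.List.max? xs (fun x => x.1) = some m) :
    ∃ pre post, xs = pre ++ m :: post ∧ (∀ y ∈ pre, y.1 < m.1) ∧ (∀ y ∈ post, y.1 ≤ m.1) := by
  cases xs with
  | nil => simp [PySem.List.max?] at h
  | cons x t =>
    rcases pv_max_aux t x m h with ⟨rfl, hall⟩ | ⟨pre, post, rfl, hlt, hpre, hpost⟩
    · exact ⟨[], t, rfl, by simp, hall⟩
    · refine ⟨x :: pre, post, rfl, ?_, hpost⟩
      intro z hz
      rcases List.mem_cons.mp hz with rfl | hz
      · exact hlt
      · exact hpre z hz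

-- insert m in front when the head (if any) is strictly smaller
theorem pv_ins_front (m : Int × Int × String) (l : List (Int × Int × String))
    (h : ∀ z zs, l = z :: zs → z.1 < m.1) :
    PySem.List.insertBy (fun a b => decide (b.1 < a.1)) m l = m :: l := by
  cases l with
  | nil => rfl
  | cons z zs => simp [PySem.List.insertBy, h z zs rfl]

-- inserting only smaller-or-equal keys keeps the maximal head in place
theorem pv_foldl_ins_cons (post : List (Int × Int × String)) :
    ∀ (acc : List (Int × Int × String)) (m : Int × Int × String),
    (∀ y ∈ post, y.1 ≤ m.1) →
    post.foldl (fun acc x => PySem.List.insertBy (fun a b => decide (b.1 < a.1)) x acc) (m :: acc)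
      = m :: post.foldl (fun acc x => PySem.List.insertBy (fun a b => decide (b.1 < a.1)) x acc) acc := by
  induction post with
  | nil => intro acc m _; rfl
  | cons y ys ih =>
    intro acc m hle
    have hy : ¬ (m.1 < y.1) := by have := hle y (by simp); omega
    rw [List.foldl_cons, List.foldl_cons]
    have hstep : PySem.List.insertBy (fun a b => decide (b.1 < a.1)) y (m :: acc)
        = m :: PySem.List.insertBy (fun a b => decide (b.1 < a.1)) y acc := by
      simp [PySem.List.insertBy, hy]
    rw [hstep, ih _ m (fun z hz => hle z (by simp [hz]))]

-- the stable descending sort starts with the first maximal element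
theorem pv_sorted_sel (pre post : List (Int × Int × String)) (m : Int × Int × String)
    (hpre : ∀ y ∈ pre, y.1 < m.1) (hpost : ∀ y ∈ post, y.1 ≤ m.1) :
    PySem.List.sorted (pre ++ m :: post) (fun x => x.1) true
      = m :: PySem.List.sorted (pre ++ post) (fun x => x.1) true := by
  rw [PySem.List.sorted_rev_eq_foldl_insertBy, PySem.List.sorted_rev_eq_foldl_insertBy,
    List.foldl_append, List.foldl_cons, List.foldl_append]
  have hfront : PySem.List.insertBy (fun a b => decide (b.1 < a.1)) m
      (pre.foldl (fun acc x => PySem.List.insertBy (fun a b => decide (b.1 < a.1)) x acc) [])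
      = m :: pre.foldl (fun acc x => PySem.List.insertBy (fun a b => decide (b.1 < a.1)) x acc) [] := by
    apply pv_ins_front
    intro z zs hz
    apply hpre
    have hz' : z ∈ PySem.List.sorted pre (fun x : Int × Int × String => x.1) true := by
      rw [PySem.List.sorted_rev_eq_foldl_insertBy, hz]; simp
    exact (PySem.List.mem_sorted _ _ _ _).mp hz'
  rw [hfront, pv_foldl_ins_cons post _ m hpost]

-- equation lemmas for pvLoopB
theorem pvLoopB_none (text : String) (rem : List (Int × Int × String)) (acc : String)
    (h : PySem.List.max? rem (fun x => x.1) = none) : pvLoopB text rem acc = acc := by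
  rw [pvLoopB]; simp only [h]

theorem pvLoopB_some_some (text : String) (rem : List (Int × Int × String)) (acc : String)
    (entity : Int × Int × String) (rest : List (Int × Int × String))
    (h : PySem.List.max? rem (fun x => x.1) = some entity)
    (h2 : PySem.List.remove? rem entity = some rest) :
    pvLoopB text rem acc
      = pvLoopB text rest
          (PySem.Str.slice acc none (some entity.1) ++ pvSpan text entity ++
            PySem.Str.slice acc (some entity.2.1) none) := by
  rw [pvLoopB]
  simp only [h]
  split
  · rename_i heq; rw [h2] at heq; cases heq
  · rename_i r heq; rw [h2] at heq; cases heq; rfl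

-- B's selection loop replays A's fold over the stable descending sort
theorem pv_loop_eq (text : String) (rem : List (Int × Int × String)) (acc : String) :
    pvLoopB text rem acc
      = (PySem.List.sorted rem (fun x => x.1) true).foldl
          (fun replaced ent =>
            PySem.Str.slice replaced none (some ent.1) ++ pvSpan text ent ++
              PySem.Str.slice replaced (some ent.2.1) none)
          acc := by
  induction rem, acc using pvLoopB.induct text with
  | case1 rem acc hnone =>
    rw [pvLoopB_none text rem acc hnone]
    have : rem = [] := by
      cases rem with
      | nil => rfl
      | cons x t => simp [PySem.List.max?_eq_none_iff] at hnone
    subst this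
    rw [(PySem.List.sorted_eq_nil_iff _ _ _).mpr rfl]
    rfl
  | case2 rem acc entity hmax hnone =>
    exact absurd (PySem.List.max?_mem hmax)
      ((PySem.List.remove?_eq_none_iff rem entity).mp hnone)
  | case3 rem acc entity hmax rest hrem ih =>
    rw [pvLoopB_some_some text rem acc entity rest hmax hrem]
    have hmem : entity ∈ rem := PySem.List.max?_mem hmax
    have hrest : rest = rem.erase entity := by
      rw [PySem.List.remove?_eq_some_erase rem entity hmem] at hrem
      cases hrem; rfl
    obtain ⟨pre, post, hsplit, hpre, hpost⟩ := pv_max_split rem entity hmax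
    have hnotin : entity ∉ pre := by
      intro hz
      exact absurd (hpre entity hz) (lt_irrefl _)
    have herase : rem.erase entity = pre ++ post := by
      rw [hsplit, List.erase_append_right _ hnotin, List.erase_cons_head]
    rw [hsplit, pv_sorted_sel pre post entity hpre hpost, List.foldl_cons]
    rw [ih, hrest, herase]

-- ===== VERDICT (by name: the statement is the Claim_ definition above) =====
theorem replace_entities_spec : Claim_equal_replace_entities := by
  intro text entities _
  unfold Spec_replace_entities replace_entities replace_entities_alt
  exact (pv_loop_eq text entities text).symm
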